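-- pv_equiv track=rewrite | github.com/yeoeol/Algo | 백준/Gold/12852. 1로 만들기 2/1로 만들기 2.py | bfs
-- ===== SOURCE A (Python) =====
-- from collections import deque
--
-- def bfs(x):
--     visited = [False]*(x+1)
--     visited[x] = True
--     queue = deque()
--     queue.append((x, [x]))
--
--     while queue:
--         p, lst = queue.popleft()
--         if p == 1:
--             return lst
--
--         if p % 3 == 0 and not visited[p//3]:
--             queue.append((p//3, lst+[p//3]))
--             visited[p//3] = True
--         if p % 2 == 0 and not visited[p//2]:
--             queue.append((p//2, lst+[p//2]))
--             visited[p//2] = True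
--         if not visited[p-1]:
--             queue.append((p-1, lst+[p-1]))
--             visited[p-1] = True
-- ===== SOURCE B (Python) =====
-- def bfs(x):
--     # Bottom-up DP table of minimal step counts, then greedy path reconstruction
--     # (first neighbour in the order //3, //2, -1 whose dp value drops by one).
--     dp = [0] * (x + 1)
--     for i in range(2, x + 1):
--         best = dp[i - 1]
--         if i % 2 == 0 and dp[i // 2] < best:
--             best = dp[i // 2]
--         if i % 3 == 0 and dp[i // 3] < best:
--             best = dp[i // 3]
--         dp[i] = best + 1
--     path = [x]
--     cur = x
--     while cur != 1:
--         if cur % 3 == 0 and dp[cur // 3] == dp[cur] - 1: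
--             cur = cur // 3
--         elif cur % 2 == 0 and dp[cur // 2] == dp[cur] - 1:
--             cur = cur // 2
--         else:
--             cur = cur - 1
--         path.append(cur)
--     return path
-- ===== Notes on version B (the rewrite author's own statement) =====
-- stated objective: alternative
-- what changed: A's BFS (deque of (node, full-path-copy) pairs plus visited array) is replaced by a bottom-up DP table dp[i] = min steps from i to 1 followed by a greedy reconstruction that at each node takes the first neighbour (order //3, //2, -1) whose dp value drops by one; no queue and no per-node path lists are kept.
-- outside the precondition, e.g. on bfs(0): A returns None, B raises IndexError; on bfs(-3): A raises IndexError, B raises IndexError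
import Mathlib
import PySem

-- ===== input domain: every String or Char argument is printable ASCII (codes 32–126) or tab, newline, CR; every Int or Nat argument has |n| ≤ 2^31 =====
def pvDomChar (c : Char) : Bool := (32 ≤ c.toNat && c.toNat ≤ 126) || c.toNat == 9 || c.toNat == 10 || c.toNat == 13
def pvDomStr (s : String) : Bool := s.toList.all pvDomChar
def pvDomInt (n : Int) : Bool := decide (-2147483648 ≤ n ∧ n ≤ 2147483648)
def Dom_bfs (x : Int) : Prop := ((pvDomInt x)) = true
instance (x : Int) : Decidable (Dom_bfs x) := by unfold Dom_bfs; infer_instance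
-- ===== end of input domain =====

-- B replaces A's BFS (queue of (node, full path) pairs) by a bottom-up DP table of minimal
-- step counts plus a greedy path reconstruction; equivalence of the RETURN value is proved
-- for every x ≥ 1 (A raises IndexError for x < 0 and returns None for x = 0).

-- ===== PORT A =====
-- Literal port of A's while-loop: `vis` is Python's `visited` list, the queue holds
-- (node, path) pairs; all values are nonnegative in every admitted run, so they are
-- mirrored in ℕ (indices in range for x ≥ 1, so getD/set are exact here).
-- `fuel` bounds the iteration count (the loop pops one entry per iteration and at most
-- n+1 entries are ever enqueued); [] stands for Python's None fall-through (x ≤ 0 only).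
def bfsLoop : Nat → List Bool → List (Nat × List Nat) → List Nat
  | 0, _, _ => []
  | _+1, _, [] => []
  | fuel+1, vis, (p, l) :: rest =>
    if p = 1 then l else
    let s1 := if p % 3 = 0 ∧ vis.getD (p / 3) false = false then
        (vis.set (p / 3) true, rest ++ [(p / 3, l ++ [p / 3])]) else (vis, rest)
    let s2 := if p % 2 = 0 ∧ s1.1.getD (p / 2) false = false then
        (s1.1.set (p / 2) true, s1.2 ++ [(p / 2, l ++ [p / 2])]) else s1
    let s3 := if s2.1.getD (p - 1) false = false then
        (s2.1.set (p - 1) true, s2.2 ++ [(p - 1, l ++ [p - 1])]) else s2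
    bfsLoop fuel s3.1 s3.2

def bfs (x : Int) : List Int :=
  if x < 1 then [] else
  let n := x.toNat
  let visited := (List.replicate (n + 1) false).set n true
  (bfsLoop (n + 1) visited [(n, [n])]).map (fun v => (v : Int))

-- ===== PORT B =====
-- Literal port of Source B: dp-table pass `for i in range(2, x+1)` then greedy reconstruction
-- `while cur != 1`; `fuel = cur` bounds the while-loop (cur strictly decreases).
def dpStep (dp : List Nat) (i : Nat) : List Nat :=
  let b0 := dp.getD (i - 1) 0
  let b1 := if i % 2 = 0 ∧ dp.getD (i / 2) 0 < b0 then dp.getD (i / 2) 0 else b0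
  let b2 := if i % 3 = 0 ∧ dp.getD (i / 3) 0 < b1 then dp.getD (i / 3) 0 else b1
  dp.set i (b2 + 1)

def rebuild : Nat → List Nat → Nat → List Nat
  | 0, _, _ => []
  | fuel+1, dp, cur =>
    if cur = 1 then [] else
    let nxt := if cur % 3 = 0 ∧ dp.getD (cur / 3) 0 = dp.getD cur 0 - 1 then cur / 3
      else if cur % 2 = 0 ∧ dp.getD (cur / 2) 0 = dp.getD cur 0 - 1 then cur / 2
      else cur - 1
    nxt :: rebuild fuel dp nxt

def bfs_alt (x : Int) : List Int :=
  if x < 1 then [] else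
  let n := x.toNat
  let dp := (List.range' 2 (n - 1)).foldl dpStep (List.replicate (n + 1) 0)
  ((n :: rebuild n dp n).map (fun v => (v : Int)))

-- ===== PRECONDITION & SPEC =====
-- Pre_ excludes exactly the inputs on which A does not return a list: for x < 0 A raises
-- IndexError, and for x = 0 the queue empties and A falls through returning None.
def Pre_bfs (x : Int) : Prop := 1 ≤ x
instance (x : Int) : Decidable (Pre_bfs x) := by unfold Pre_bfs; infer_instance
def pvWitness_bfs : Int := 10
def Spec_bfs (x : Int) (out : List Int) : Prop := out = bfs_alt x
instance (x : Int) (out : List Int) : Decidable (Spec_bfs x out) := by unfold Spec_bfs; infer_instance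

-- ===== CLAIM (what is proved, stated in full; the proofs are below) =====
def Claim_equal_bfs : Prop := ∀ (x : Int), Dom_bfs x → Pre_bfs x → Spec_bfs x (bfs x)

-- ===== LEMMAS AND PROOFS =====

/- Mathematical skeleton shared by both proofs: `d1 n` = minimal number of moves n → 1,
   `pick n` = first neighbour (order n/3, n/2, n-1) one move closer to 1, `gchain n k` =
   k-th node of the greedy path, `gp N k` its prefix, `distX N v` = BFS distance from the
   start N down to v.  A's BFS and B's reconstruction both return `gp N (d1 N)`. -/

def nbrs (n : Nat) : List Nat :=
  (if n % 3 = 0 then [n / 3] else []) ++ (if n % 2 = 0 then [n / 2] else []) ++ [n - 1]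

def d1 (n : Nat) : Nat :=
  if h : n ≤ 1 then 0
  else 1 + min (min (if n % 3 = 0 then d1 (n / 3) else d1 (n - 1))
                    (if n % 2 = 0 then d1 (n / 2) else d1 (n - 1)))
               (d1 (n - 1))
termination_by n
decreasing_by all_goals omega

def pick (n : Nat) : Nat :=
  if n % 3 = 0 ∧ d1 (n / 3) + 1 = d1 n then n / 3
  else if n % 2 = 0 ∧ d1 (n / 2) + 1 = d1 n then n / 2
  else n - 1

def gchain (n : Nat) : Nat → Nat
  | 0 => n
  | k+1 => pick (gchain n k)

def gp (N k : Nat) : List Nat := (List.range (k + 1)).map (gchain N)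

def distX (N v : Nat) : Nat :=
  if v = 0 ∨ N ≤ v then 0
  else 1 + min (min (if 3 * v ≤ N then distX N (3 * v) else distX N (v + 1))
                    (if 2 * v ≤ N then distX N (2 * v) else distX N (v + 1)))
               (distX N (v + 1))
termination_by N - v
decreasing_by all_goals omega

lemma d1_zero : d1 0 = 0 := by rw [d1]; simp
lemma d1_one : d1 1 = 0 := by rw [d1]; simp
lemma d1_pos {n : Nat} (h : 2 ≤ n) : 1 ≤ d1 n := by
  rw [d1]; simp only [show ¬ n ≤ 1 by omega, dite_false]; omega
lemma d1_eq_zero_iff {n : Nat} (h : 1 ≤ n) : d1 n = 0 ↔ n = 1 := by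
  constructor
  · intro h0; by_contra hn; have := d1_pos (n := n) (by omega); omega
  · rintro rfl; exact d1_one
lemma mem_nbrs_iff {u v : Nat} (hu : 2 ≤ u) :
    v ∈ nbrs u ↔ u = 3 * v ∨ u = 2 * v ∨ u = v + 1 := by
  unfold nbrs
  by_cases h3 : u % 3 = 0 <;> by_cases h2 : u % 2 = 0 <;> simp [h3, h2] <;> omega
lemma mem_nbrs_lt {u v : Nat} (hu : 2 ≤ u) (h : v ∈ nbrs u) : v < u := by
  rw [mem_nbrs_iff hu] at h; omega
lemma mem_nbrs_pos {u v : Nat} (hu : 2 ≤ u) (h : v ∈ nbrs u) : 1 ≤ v := by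
  rw [mem_nbrs_iff hu] at h; omega
lemma nbrs_one : nbrs 1 = [0] := by decide
lemma nbrs_pairwise (u : Nat) : (nbrs u).Pairwise (· ≤ ·) := by
  unfold nbrs
  by_cases h3 : u % 3 = 0 <;> by_cases h2 : u % 2 = 0 <;> simp [h3, h2] <;> omega
lemma d1_le_nbr {n m : Nat} (h2 : 2 ≤ n) (hm : m ∈ nbrs n) : d1 n ≤ d1 m + 1 := by
  rw [mem_nbrs_iff h2] at hm
  rw [d1]; simp only [show ¬ n ≤ 1 by omega, dite_false]
  rcases hm with h | h | h
  · have h3 : n % 3 = 0 := by omega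
    have he : n / 3 = m := by omega
    simp [h3, he]; omega
  · have h2' : n % 2 = 0 := by omega
    have he : n / 2 = m := by omega
    simp [h2', he]; omega
  · have he : n - 1 = m := by omega
    rw [he]; omega
lemma d1_attained {n : Nat} (h2 : 2 ≤ n) : ∃ m ∈ nbrs n, d1 m + 1 = d1 n := by
  have hmem : n - 1 ∈ nbrs n := by rw [mem_nbrs_iff h2]; omega
  rw [d1]; simp only [show ¬ n ≤ 1 by omega, dite_false]
  by_cases h3 : n % 3 = 0 <;> by_cases hh2 : n % 2 = 0 <;>
    simp only [h3, hh2, if_true, if_false]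
  · rcases Nat.lt_trichotomy (d1 (n/3)) (d1 (n/2)) with h | h | h
    all_goals rcases Nat.lt_trichotomy (min (d1 (n/3)) (d1 (n/2))) (d1 (n-1)) with g | g | g
    all_goals first
      | (exact ⟨n/3, by rw [mem_nbrs_iff h2]; omega, by omega⟩)
      | (exact ⟨n/2, by rw [mem_nbrs_iff h2]; omega, by omega⟩)
      | (exact ⟨n-1, hmem, by omega⟩)
  · exact if h : d1 (n/3) < d1 (n-1) then ⟨n/3, by rw [mem_nbrs_iff h2]; omega, by omega⟩
      else ⟨n-1, hmem, by omega⟩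
  · exact if h : d1 (n/2) < d1 (n-1) then ⟨n/2, by rw [mem_nbrs_iff h2]; omega, by omega⟩
      else ⟨n-1, hmem, by omega⟩
  · exact ⟨n-1, hmem, by omega⟩
lemma pick_spec {n : Nat} (h2 : 2 ≤ n) : pick n ∈ nbrs n ∧ d1 (pick n) + 1 = d1 n := by
  obtain ⟨m, hm, hd⟩ := d1_attained h2
  rw [mem_nbrs_iff h2] at hm
  unfold pick
  split_ifs with hc1 hc2
  · obtain ⟨ha, hb⟩ := hc1
    exact ⟨by rw [mem_nbrs_iff h2]; omega, hb⟩
  · obtain ⟨ha, hb⟩ := hc2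
    exact ⟨by rw [mem_nbrs_iff h2]; omega, hb⟩
  · refine ⟨by rw [mem_nbrs_iff h2]; omega, ?_⟩
    rcases hm with h | h | h
    · exfalso; apply hc1
      have h3 : n % 3 = 0 := by omega
      have he : n / 3 = m := by omega
      exact ⟨h3, by rw [he]; exact hd⟩
    · exfalso; apply hc2
      have h2' : n % 2 = 0 := by omega
      have he : n / 2 = m := by omega
      exact ⟨h2', by rw [he]; exact hd⟩
    · have he : n - 1 = m := by omega
      rw [he]; exact hd
lemma pick_min {n m : Nat} (h2 : 2 ≤ n) (hm : m ∈ nbrs n) (hd : d1 m + 1 = d1 n) :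
    pick n ≤ m := by
  rw [mem_nbrs_iff h2] at hm
  unfold pick
  split_ifs with hc1 hc2
  · rcases hm with h | h | h <;> omega
  · rcases hm with h | h | h
    · exfalso; apply hc1
      have h3 : n % 3 = 0 := by omega
      have he : n / 3 = m := by omega
      exact ⟨h3, by rw [he]; exact hd⟩
    · omega
    · omega
  · rcases hm with h | h | h
    · exfalso; apply hc1
      have h3 : n % 3 = 0 := by omega
      have he : n / 3 = m := by omega
      exact ⟨h3, by rw [he]; exact hd⟩
    · exfalso; apply hc2
      have h2' : n % 2 = 0 := by omega
      have he : n / 2 = m := by omega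
      exact ⟨h2', by rw [he]; exact hd⟩
    · omega
lemma pick_lt {n : Nat} (h2 : 2 ≤ n) : pick n < n := mem_nbrs_lt h2 (pick_spec h2).1
lemma pick_pos {n : Nat} (h2 : 2 ≤ n) : 1 ≤ pick n := mem_nbrs_pos h2 (pick_spec h2).1
lemma gchain_prop {n : Nat} (h1 : 1 ≤ n) :
    ∀ k, k ≤ d1 n → d1 (gchain n k) = d1 n - k ∧ 1 ≤ gchain n k ∧ gchain n k ≤ n := by
  intro k
  induction k with
  | zero => intro _; exact ⟨by simp [gchain], h1, le_rfl⟩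
  | succ k ih =>
    intro hk
    obtain ⟨hd, hp, hle⟩ := ih (by omega)
    have h2 : 2 ≤ gchain n k := by
      by_contra h
      have he : gchain n k = 1 := by omega
      rw [he, d1_one] at hd; omega
    obtain ⟨hmem, hdp⟩ := pick_spec h2
    have hlt := mem_nbrs_lt h2 hmem
    have hpos := mem_nbrs_pos h2 hmem
    show d1 (pick (gchain n k)) = d1 n - (k+1) ∧ 1 ≤ pick (gchain n k) ∧ pick (gchain n k) ≤ n
    exact ⟨by omega, hpos, by omega⟩
lemma gchain_two {n k : Nat} (h1 : 1 ≤ n) (hk : k < d1 n) : 2 ≤ gchain n k := by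
  obtain ⟨hd, hp, _⟩ := gchain_prop h1 k (by omega)
  by_contra h
  have he : gchain n k = 1 := by omega
  rw [he, d1_one] at hd; omega
lemma gchain_mem {n k : Nat} (h1 : 1 ≤ n) (hk : k < d1 n) :
    gchain n (k+1) ∈ nbrs (gchain n k) := (pick_spec (gchain_two h1 hk)).1
lemma gchain_last {n : Nat} (h1 : 1 ≤ n) : gchain n (d1 n) = 1 := by
  obtain ⟨hd, hp, _⟩ := gchain_prop h1 (d1 n) le_rfl
  have h0 : d1 (gchain n (d1 n)) = 0 := by omega
  exact (d1_eq_zero_iff hp).mp h0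
lemma gchain_shift (n : Nat) : ∀ k, gchain n (k + 1) = gchain (pick n) k := by
  intro k; induction k with
  | zero => rfl
  | succ k ih => show pick (gchain n (k+1)) = pick (gchain (pick n) k); rw [ih]
lemma distX_self (N : Nat) : distX N N = 0 := by rw [distX]; simp
lemma distX_pos {N v : Nat} (h1 : 1 ≤ v) (h : v < N) : 1 ≤ distX N v := by
  rw [distX]; simp only [show ¬ (v = 0 ∨ N ≤ v) by omega, ite_false]; omega
lemma distX_eq_zero_iff {N v : Nat} (h1 : 1 ≤ v) (hv : v ≤ N) : distX N v = 0 ↔ v = N := by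
  constructor
  · intro h0; by_contra hn
    have hvn : v < N := by omega
    have := distX_pos h1 hvn; omega
  · rintro rfl; exact distX_self _
lemma distX_le_parent {N u v : Nat} (hu2 : 2 ≤ u) (hu : u ≤ N) (hv : v ∈ nbrs u) :
    distX N v ≤ distX N u + 1 := by
  rw [mem_nbrs_iff hu2] at hv
  have hv1 : 1 ≤ v := by omega
  have hvu : v < u := by omega
  rw [distX]
  simp only [show ¬ (v = 0 ∨ N ≤ v) by omega, ite_false]
  rcases hv with h | h | h
  · subst h; simp only [show 3 * v ≤ N by omega, if_true]; omega
  · subst h; simp only [show 2 * v ≤ N by omega, if_true]; omega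
  · subst h; omega
lemma distX_attained {N v : Nat} (h1 : 1 ≤ v) (h : v < N) :
    ∃ u, v ∈ nbrs u ∧ 2 ≤ u ∧ u ≤ N ∧ distX N v = distX N u + 1 := by
  have hm3 : 3 * v ≤ N → v ∈ nbrs (3 * v) := by
    intro _; rw [mem_nbrs_iff (by omega)]; omega
  have hm2 : 2 * v ≤ N → v ∈ nbrs (2 * v) := by
    intro _; rw [mem_nbrs_iff (by omega)]; omega
  have hm1 : v ∈ nbrs (v + 1) := by rw [mem_nbrs_iff (by omega)]; omega
  rw [distX]
  simp only [show ¬ (v = 0 ∨ N ≤ v) by omega, ite_false]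
  by_cases h3 : 3 * v ≤ N <;> by_cases h2 : 2 * v ≤ N <;>
    simp only [h3, h2, if_true, if_false]
  · rcases Nat.lt_trichotomy (distX N (3*v)) (distX N (2*v)) with hh | hh | hh
    all_goals rcases Nat.lt_trichotomy (min (distX N (3*v)) (distX N (2*v))) (distX N (v+1)) with g | g | g
    all_goals first
      | (exact ⟨3*v, hm3 h3, by omega, by omega, by omega⟩)
      | (exact ⟨2*v, hm2 h2, by omega, by omega, by omega⟩)
      | (exact ⟨v+1, hm1, by omega, by omega, by omega⟩)
  · omega
  · exact if g : distX N (2*v) < distX N (v+1) then ⟨2*v, hm2 h2, by omega, by omega, by omega⟩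
      else ⟨v+1, hm1, by omega, by omega, by omega⟩
  · exact ⟨v+1, hm1, by omega, by omega, by omega⟩
lemma d1_le_distX {N v : Nat} (h1 : 1 ≤ v) (hv : v ≤ N) : d1 N ≤ distX N v + d1 v := by
  have key : ∀ d w, 1 ≤ w → w ≤ N → N - w = d → d1 N ≤ distX N w + d1 w := by
    intro d
    induction d using Nat.strong_induction_on with
    | _ d ih =>
      intro w h1w hw hd
      rcases Nat.eq_or_lt_of_le hw with rfl | hlt
      · simp [distX_self]
      · obtain ⟨u, hmem, hu2, huN, hdx⟩ := distX_attained h1w hlt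
        have hult : w < u := mem_nbrs_lt hu2 hmem
        have h2 := ih (N - u) (by omega) u (by omega) huN rfl
        have hle := d1_le_nbr hu2 hmem
        omega
  exact key (N - v) v h1 hv rfl
lemma distX_gchain {N : Nat} (h1 : 1 ≤ N) : ∀ {k : Nat}, k ≤ d1 N → distX N (gchain N k) = k := by
  have hle : ∀ k, k ≤ d1 N → distX N (gchain N k) ≤ k := by
    intro k
    induction k with
    | zero => intro _; simp [gchain, distX_self]
    | succ k ih =>
      intro hk
      have h2 : 2 ≤ gchain N k := gchain_two h1 (by omega)
      have hleN : gchain N k ≤ N := (gchain_prop h1 k (by omega)).2.2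
      have ha := distX_le_parent h2 hleN (gchain_mem h1 (by omega))
      have hb := ih (by omega)
      omega
  intro k hk
  obtain ⟨hd, hp, hleN⟩ := gchain_prop h1 k hk
  have hge := d1_le_distX (N := N) hp hleN
  have hl := hle k hk
  omega
-- ---- gp helpers ----
lemma gp_length (N k : Nat) : (gp N k).length = k + 1 := by simp [gp]
lemma gp_getD {N k i : Nat} (h : i ≤ k) : (gp N k).getD i 0 = gchain N i := by
  unfold gp
  rw [List.getD_eq_getElem?_getD, List.getElem?_map, List.getElem?_range (by omega)]
  rfl
lemma gp_succ (N k : Nat) : gp N (k + 1) = gp N k ++ [gchain N (k + 1)] := by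
  unfold gp
  rw [List.range_succ, List.map_append]
  rfl
lemma gp_zero (N : Nat) : gp N 0 = [N] := by
  unfold gp
  rw [List.range_one]
  rfl

-- ---- lexicographic order ----
lemma lex_append {l m : List Nat} (hlen : l.length = m.length)
    (h : List.Lex (· < ·) l m) (a b : List Nat) : List.Lex (· < ·) (l ++ a) (m ++ b) := by
  induction h with
  | nil => simp at hlen
  | rel hr => exact List.Lex.rel hr
  | cons h ih => exact List.Lex.cons (ih (by simpa using hlen))
lemma lex_append_singleton {l : List Nat} {c c' : Nat} (h : c < c') :
    List.Lex (· < ·) (l ++ [c]) (l ++ [c']) := by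
  induction l with
  | nil => exact List.Lex.rel h
  | cons a l ih => exact List.Lex.cons ih
lemma lex_of_agree : ∀ (i : Nat) (l m : List Nat), i < l.length → i < m.length →
    (∀ j, j < i → l.getD j 0 = m.getD j 0) → l.getD i 0 < m.getD i 0 →
    List.Lex (· < ·) l m := by
  intro i
  induction i with
  | zero =>
    intro l m hl hm _ hlt
    match l, m with
    | a :: l, b :: m =>
      simp only [List.getD_cons_zero] at hlt
      exact List.Lex.rel hlt
  | succ i ih =>
    intro l m hl hm hagree hlt
    match l, m with
    | a :: l, b :: m =>
      have h0 := hagree 0 (by omega)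
      simp only [List.getD_cons_zero] at h0
      subst h0
      refine List.Lex.cons (ih l m (by simpa using hl) (by simpa using hm) ?_ ?_)
      · intro j hj
        have := hagree (j+1) (by omega)
        simpa using this
      · simpa using hlt
lemma lex_asymm {l m : List Nat} (h : List.Lex (· < ·) l m) :
    ¬ List.Lex (· < ·) m l := by
  induction h with
  | nil => intro h'; cases h'
  | rel hr => intro h'; cases h' <;> omega
  | cons h ih => intro h'; cases h' <;> [omega; exact ih ‹_›]

-- ---- fresh-children machinery ----
def freshList (vis : List Bool) : List Nat → List Nat
  | [] => []
  | c :: cs => if vis.getD c false = true then freshList vis cs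
               else c :: freshList (vis.set c true) cs
def setAll (vis : List Bool) (cs : List Nat) : List Bool :=
  cs.foldl (fun v c => v.set c true) vis
lemma getD_set_eq {α : Type} {l : List α} {i : Nat} {d b : α} (h : i < l.length) :
    (l.set i b).getD i d = b := by
  simp [List.getD_eq_getElem?_getD, h]
lemma getD_set_ne {α : Type} {l : List α} {i j : Nat} {d : α} (h : i ≠ j) (b : α) :
    (l.set i b).getD j d = l.getD j d := by
  simp [List.getD_eq_getElem?_getD, List.getElem?_set_ne h]
lemma getD_replicate0 {n i : Nat} : (List.replicate n (0:Nat)).getD i 0 = 0 := by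
  rw [List.getD_eq_getElem?_getD, List.getElem?_replicate]
  split_ifs <;> rfl
lemma length_setAll (cs : List Nat) (vis : List Bool) : (setAll vis cs).length = vis.length := by
  induction cs generalizing vis with
  | nil => rfl
  | cons c cs ih =>
    show (setAll (vis.set c true) cs).length = _
    rw [ih]; simp
lemma getD_setAll {cs : List Nat} {vis : List Bool} (hcs : ∀ c ∈ cs, c < vis.length) (v : Nat) :
    (setAll vis cs).getD v false = true ↔ v ∈ cs ∨ vis.getD v false = true := by
  induction cs generalizing vis with
  | nil => simp [setAll]
  | cons c cs ih =>
    have hc : c < vis.length := hcs c (by simp)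
    have hlen : ∀ a ∈ cs, a < (vis.set c true).length := by
      intro a ha; rw [List.length_set]; exact hcs a (List.mem_cons_of_mem _ ha)
    have hrec := ih (vis := vis.set c true) hlen
    show (setAll (vis.set c true) cs).getD v false = true ↔ _
    rw [hrec]
    by_cases hvc : v = c
    · subst hvc
      constructor
      · intro _; exact Or.inl (List.mem_cons.mpr (Or.inl rfl))
      · intro _; right; rw [getD_set_eq hc]
    · rw [getD_set_ne (fun h => hvc h.symm)]
      simp only [List.mem_cons]
      tauto
lemma mem_freshList {cs : List Nat} {vis : List Bool} (hcs : ∀ c ∈ cs, c < vis.length) (v : Nat) :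
    v ∈ freshList vis cs ↔ v ∈ cs ∧ vis.getD v false = false := by
  induction cs generalizing vis with
  | nil => simp [freshList]
  | cons c cs ih =>
    have hc : c < vis.length := hcs c (by simp)
    by_cases hb : vis.getD c false = true
    · have he : freshList vis (c :: cs) = freshList vis cs := by rw [freshList, if_pos hb]
      rw [he, ih (fun a ha => hcs a (List.mem_cons_of_mem _ ha))]
      constructor
      · rintro ⟨h1, h2⟩; exact ⟨List.mem_cons_of_mem _ h1, h2⟩
      · rintro ⟨h1, h2⟩
        rcases List.mem_cons.mp h1 with rfl | h1'
        · rw [h2] at hb; cases hb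
        · exact ⟨h1', h2⟩
    · have hb' : vis.getD c false = false := by revert hb; cases vis.getD c false <;> simp
      have he : freshList vis (c :: cs) = c :: freshList (vis.set c true) cs := by
        rw [freshList, if_neg hb]
      have hlen : ∀ a ∈ cs, a < (vis.set c true).length := by
        intro a ha; rw [List.length_set]; exact hcs a (List.mem_cons_of_mem _ ha)
      rw [he]
      constructor
      · intro hv
        rcases List.mem_cons.mp hv with rfl | hv'
        · exact ⟨List.mem_cons.mpr (Or.inl rfl), hb'⟩
        · obtain ⟨h1, h2⟩ := (ih hlen).mp hv'
          by_cases hvc : v = c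
          · subst hvc; rw [getD_set_eq hc] at h2; cases h2
          · rw [getD_set_ne (fun hh => hvc hh.symm)] at h2
            exact ⟨List.mem_cons_of_mem _ h1, h2⟩
      · rintro ⟨h1, h2⟩
        rcases List.mem_cons.mp h1 with rfl | h1'
        · exact List.mem_cons.mpr (Or.inl rfl)
        · by_cases hvc : v = c
          · subst hvc; exact List.mem_cons.mpr (Or.inl rfl)
          · apply List.mem_cons_of_mem
            apply (ih hlen).mpr
            refine ⟨h1', ?_⟩
            rw [getD_set_ne (fun hh => hvc hh.symm)]
            exact h2
lemma freshList_subset {cs : List Nat} {vis : List Bool} : freshList vis cs ⊆ cs := by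
  induction cs generalizing vis with
  | nil => intro a ha; simp [freshList] at ha
  | cons c cs ih =>
    intro a ha
    rw [freshList] at ha
    split at ha
    · exact List.mem_cons_of_mem _ (ih ha)
    · rcases List.mem_cons.mp ha with rfl | h
      · exact List.mem_cons.mpr (Or.inl rfl)
      · exact List.mem_cons_of_mem _ (ih h)
lemma freshList_pairwise {cs : List Nat} {vis : List Bool}
    (hcs : ∀ c ∈ cs, c < vis.length) (hs : cs.Pairwise (· ≤ ·)) :
    (freshList vis cs).Pairwise (· < ·) := by
  induction cs generalizing vis with
  | nil => exact List.Pairwise.nil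
  | cons c cs ih =>
    have hc : c < vis.length := hcs c (by simp)
    have hlen : ∀ a ∈ cs, a < (vis.set c true).length := by
      intro a ha; rw [List.length_set]; exact hcs a (List.mem_cons_of_mem _ ha)
    obtain ⟨hhead, htail⟩ := List.pairwise_cons.mp hs
    rw [freshList]
    split
    · exact ih (fun a ha => hcs a (by simp [ha])) htail
    · rename_i hb
      refine List.pairwise_cons.mpr ⟨?_, ih hlen htail⟩
      intro b hbmem
      have hmem := (mem_freshList (vis := vis.set c true) hlen b).mp hbmem
      have hble : c ≤ b := hhead b hmem.1
      rcases Nat.eq_or_lt_of_le hble with rfl | h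
      · exfalso
        have h2 := hmem.2
        rw [getD_set_eq hc] at h2
        cases h2
      · exact h

lemma bool_false_eq (b : Bool) : (b = false) = ¬(b = true) := by cases b <;> simp

set_option maxHeartbeats 1000000 in
lemma body_eq (fuel : Nat) (vis : List Bool) (p : Nat) (l : List Nat)
    (rest : List (Nat × List Nat)) :
    bfsLoop (fuel+1) vis ((p, l) :: rest) =
      if p = 1 then l else
      bfsLoop fuel (setAll vis (freshList vis (nbrs p)))
        (rest ++ (freshList vis (nbrs p)).map (fun c => (c, l ++ [c]))) := by
  by_cases hp : p = 1
  · simp [bfsLoop, hp]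
  · simp only [hp, if_false]
    show (if p = 1 then l else _) = _
    simp only [hp, if_false]
    by_cases h3 : p % 3 = 0 <;> by_cases h2 : p % 2 = 0 <;>
      simp only [nbrs, h3, h2, if_true, if_false,
        List.nil_append, List.cons_append, List.append_nil] <;>
      simp only [freshList, setAll, true_and, false_and, if_false, bool_false_eq] <;>
      split_ifs <;>
      simp only [List.foldl, List.map_cons, List.map_nil, List.append_nil] <;>
      simp [List.append_assoc]

-- ---- the invariant ----
def Entry (N : Nat) (e : Nat × List Nat) : Prop :=
  e.2.length = distX N e.1 + 1 ∧
  e.2.getD 0 0 = N ∧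
  e.2.getD (e.2.length - 1) 0 = e.1 ∧
  (∀ i, i + 1 < e.2.length → e.2.getD (i+1) 0 ∈ nbrs (e.2.getD i 0)) ∧
  (∀ i, i < e.2.length → 1 ≤ e.2.getD i 0 ∧ e.2.getD i 0 ≤ N ∧ distX N (e.2.getD i 0) = i)

def eLt (N : Nat) (e e' : Nat × List Nat) : Prop :=
  distX N e.1 < distX N e'.1 ∨
  (distX N e.1 = distX N e'.1 ∧ List.Lex (· < ·) e.2 e'.2)

structure BfsInv (N : Nat) (P q : List (Nat × List Nat)) (vis : List Bool) : Prop where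
  hlen : vis.length = N + 1
  hE : ∀ e ∈ P ++ q, Entry N e
  hPW : (P ++ q).Pairwise (eLt N)
  hSpan : ∀ e ∈ q, ∀ e' ∈ q, distX N e.1 ≤ distX N e'.1 + 1
  hVis : ∀ v, 1 ≤ v → v ≤ N → (vis.getD v false = true ↔ v ∈ (P ++ q).map Prod.fst)
  hClo : ∀ e ∈ P, ∀ c ∈ nbrs e.1, vis.getD c false = true
  hCom : ∀ v, 1 ≤ v → v ≤ N → (∀ e ∈ q, distX N v ≤ distX N e.1) → vis.getD v false = true
  hNo1 : ∀ e ∈ P, e.1 ≠ 1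
  hND : ((P ++ q).map Prod.fst).Nodup
  hG : ∀ e ∈ P ++ q, ∀ k, k ≤ d1 N → e.1 = gchain N k → e.2 = gp N k
  hPar : ∀ e ∈ q, (∃ e' ∈ q, distX N e'.1 + 1 = distX N e.1) →
      ∃ u ∈ P, e.1 ∈ nbrs u.1 ∧ e.2 = u.2 ++ [e.1]

lemma entry_bounds {N : Nat} {e : Nat × List Nat} (hE : Entry N e) : 1 ≤ e.1 ∧ e.1 ≤ N := by
  obtain ⟨E1, E2, E3, E4, E5⟩ := hE
  have h := E5 (e.2.length - 1) (by omega)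
  rw [E3] at h
  exact ⟨h.1, h.2.1⟩

lemma getD_append_left {l l' : List Nat} {i : Nat} (h : i < l.length) :
    (l ++ l').getD i 0 = l.getD i 0 := by
  simp [List.getD_eq_getElem?_getD, List.getElem?_append_left h]

lemma getD_append_last {l : List Nat} {c : Nat} : (l ++ [c]).getD l.length 0 = c := by
  rw [List.getD_eq_getElem?_getD, List.getElem?_append_right (le_refl l.length)]
  simp

lemma entry_extend {N p c : Nat} {l : List Nat} (hE : Entry N (p, l)) (hc : c ∈ nbrs p)
    (hd : distX N c = distX N p + 1) (h1c : 1 ≤ c) (hcN : c ≤ N) :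
    Entry N (c, l ++ [c]) := by
  obtain ⟨E1, E2, E3, E4, E5⟩ := hE
  simp only at E1 E2 E3 E4 E5
  have hl1 : 1 ≤ l.length := by omega
  refine ⟨?_, ?_, ?_, ?_, ?_⟩
  · simp only [List.length_append, List.length_cons, List.length_nil]
    omega
  · show (l ++ [c]).getD 0 0 = N
    rw [getD_append_left (by omega)]; exact E2
  · show (l ++ [c]).getD ((l ++ [c]).length - 1) 0 = c
    have : (l ++ [c]).length - 1 = l.length := by simp
    rw [this, getD_append_last]
  · intro i hi
    simp only [List.length_append, List.length_cons, List.length_nil] at hi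
    rcases Nat.lt_or_ge (i + 1) l.length with hlt | hge
    · rw [getD_append_left hlt, getD_append_left (by omega)]
      exact E4 i hlt
    · have hieq : i + 1 = l.length := by omega
      have hi' : i = l.length - 1 := by omega
      rw [hieq, getD_append_last, getD_append_left (by omega), hi', E3]
      exact hc
  · intro i hi
    simp only [List.length_append, List.length_cons, List.length_nil] at hi
    rcases Nat.lt_or_ge i l.length with hlt | hge
    · rw [getD_append_left hlt]
      exact E5 i hlt
    · have hieq : i = l.length := by omega
      rw [hieq, getD_append_last]
      exact ⟨h1c, hcN, by rw [hd, E1]⟩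

-- key minimality: a queued same-level path of a candidate parent of the next greedy node
-- lies lexicographically above the greedy prefix
lemma keyMin {N j p : Nat} {l : List Nat} (h1 : 1 ≤ N)
    (hEnt : Entry N (p, l)) (hj : distX N p = j) (hjd : j + 1 ≤ d1 N)
    (hne : p ≠ gchain N j) (hcand : gchain N (j+1) ∈ nbrs p) :
    List.Lex (· < ·) (gp N j) l := by
  obtain ⟨E1, E2, E3, E4, E5⟩ := hEnt
  simp only at E1 E2 E3 E4 E5
  have hlen : l.length = j + 1 := by rw [E1, hj]
  have hbp := E5 (l.length - 1) (by omega)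
  rw [E3] at hbp
  have hp2 : 2 ≤ p := by
    rcases Nat.lt_or_ge p 2 with h | h
    · exfalso
      have hp1 : p = 1 := by omega
      rw [hp1, nbrs_one] at hcand
      have hpos := (gchain_prop h1 (j+1) hjd).2.1
      simp at hcand
      omega
    · exact h
  have hgetj : l.getD j 0 = p := by
    have h := E3; rw [hlen] at h; simpa using h
  have hex : ∃ i, l.getD i 0 ≠ gchain N i := ⟨j, by rw [hgetj]; exact hne⟩
  set i0 := Nat.find hex with hi0
  have hspec : l.getD i0 0 ≠ gchain N i0 := Nat.find_spec hex
  have hminlt : ∀ m, m < i0 → l.getD m 0 = gchain N m := by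
    intro m hm
    have := Nat.find_min hex hm
    tauto
  have hle_j : i0 ≤ j := Nat.find_min' hex (by rw [hgetj]; exact hne)
  have hi0pos : 1 ≤ i0 := by
    rcases Nat.eq_zero_or_pos i0 with h | h
    · exfalso; apply hspec; rw [h]; rw [E2]; rfl
    · exact h
  have hdp : d1 p = d1 N - j := by
    have h2 := d1_le_nbr hp2 hcand
    have h3 := (gchain_prop h1 (j+1) hjd).1
    have h4 := d1_le_distX (N := N) hbp.1 hbp.2.1
    rw [hj] at h4
    omega
  have hsuffix : ∀ t, t ≤ j → d1 (l.getD (j - t) 0) ≤ d1 p + t := by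
    intro t
    induction t with
    | zero =>
      intro _
      rw [Nat.sub_zero, hgetj]
      omega
    | succ t ih =>
      intro ht
      have hidx : j - (t+1) + 1 = j - t := by omega
      have hstep := E4 (j - (t+1)) (by omega)
      rw [hidx] at hstep
      have hbn := E5 (j - t) (by omega)
      have ha2 : 2 ≤ l.getD (j - (t+1)) 0 := by
        have hbq := E5 (j - (t+1)) (by omega)
        rcases Nat.lt_or_ge (l.getD (j - (t+1)) 0) 2 with h | h
        · exfalso
          have ha1 : l.getD (j - (t+1)) 0 = 1 := by omega
          rw [ha1, nbrs_one] at hstep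
          rw [List.mem_singleton] at hstep
          omega
        · exact h
      have hd1s := d1_le_nbr ha2 hstep
      have hih := ih (by omega)
      omega
  have hbw := E5 i0 (by omega)
  have hdw : d1 (l.getD i0 0) = d1 N - i0 := by
    have h4 := d1_le_distX (N := N) hbw.1 hbw.2.1
    rw [hbw.2.2] at h4
    have h5 := hsuffix (j - i0) (by omega)
    rw [show j - (j - i0) = i0 by omega] at h5
    omega
  have hprev : l.getD (i0 - 1) 0 = gchain N (i0 - 1) := hminlt _ (by omega)
  have hstep := E4 (i0 - 1) (by omega)
  rw [show i0 - 1 + 1 = i0 by omega, hprev] at hstep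
  have hprev2 : 2 ≤ gchain N (i0 - 1) := gchain_two h1 (by omega)
  have hdprev := (gchain_prop h1 (i0 - 1) (by omega)).1
  have hpred : d1 (l.getD i0 0) + 1 = d1 (gchain N (i0 - 1)) := by omega
  have hpm := pick_min hprev2 hstep hpred
  have hgi : gchain N i0 = pick (gchain N (i0 - 1)) := by
    conv_lhs => rw [show i0 = (i0 - 1) + 1 by omega]
    rfl
  have hlt : gchain N i0 < l.getD i0 0 := by
    rcases Nat.lt_or_ge (gchain N i0) (l.getD i0 0) with h | h
    · exact h
    · exfalso
      apply hspec
      omega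
  refine lex_of_agree i0 (gp N j) l (by rw [gp_length]; omega) (by omega) ?_ ?_
  · intro m hm
    rw [gp_getD (by omega)]
    exact (hminlt m hm).symm
  · rw [gp_getD (by omega)]
    exact hlt

set_option maxHeartbeats 1000000 in
lemma step_inv {N : Nat} (h1 : 1 ≤ N) {P rest : List (Nat × List Nat)} {p : Nat}
    {l : List Nat} {vis : List Bool}
    (hI : BfsInv N P ((p, l) :: rest) vis) (hp : p ≠ 1) :
    BfsInv N (P ++ [(p, l)])
      (rest ++ (freshList vis (nbrs p)).map (fun c => (c, l ++ [c])))
      (setAll vis (freshList vis (nbrs p))) := by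
  obtain ⟨hlen, hE, hPW, hSpan, hVis, hClo, hCom, hNo1, hND, hG, hPar⟩ := hI
  set fresh := freshList vis (nbrs p) with hfr
  set news := fresh.map (fun c => (c, l ++ [c])) with hnews
  have hheadmem : (p, l) ∈ P ++ (p, l) :: rest := by simp
  have hEp : Entry N (p, l) := hE _ hheadmem
  have hpb := entry_bounds hEp
  simp only at hpb
  have hp2 : 2 ≤ p := by omega
  set j := distX N p with hj
  have hcs : ∀ c ∈ nbrs p, c < vis.length := by
    intro c hc; have := mem_nbrs_lt hp2 hc; omega
  have hfresh_mem : ∀ c, c ∈ fresh ↔ c ∈ nbrs p ∧ vis.getD c false = false :=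
    fun c => mem_freshList hcs c
  have hsub : fresh ⊆ nbrs p := freshList_subset
  have hcs' : ∀ c ∈ fresh, c < vis.length := fun c hc => hcs c (hsub hc)
  have hvis' : ∀ v, (setAll vis fresh).getD v false = true ↔ v ∈ fresh ∨ vis.getD v false = true :=
    getD_setAll hcs'
  have hPWq : ((p, l) :: rest).Pairwise (eLt N) := (List.pairwise_append.mp hPW).2.1
  have hrest_ge : ∀ e ∈ rest, j ≤ distX N e.1 := by
    intro e he
    have h := (List.pairwise_cons.mp hPWq).1 e he
    rcases h with h | ⟨h, _⟩
    · exact Nat.le_of_lt h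
    · exact Nat.le_of_eq h
  have hrest_le : ∀ e ∈ rest, distX N e.1 ≤ j + 1 := by
    intro e he
    exact hSpan e (by simp [he]) (p, l) (by simp)
  have hPcross : ∀ u ∈ P, eLt N u (p, l) := by
    intro u hu
    exact (List.pairwise_append.mp hPW).2.2 u hu (p, l) (by simp)
  have hP_le : ∀ u ∈ P, distX N u.1 ≤ j := by
    intro u hu
    rcases hPcross u hu with h | ⟨h, _⟩
    · exact Nat.le_of_lt h
    · exact Nat.le_of_eq h
  have hfresh_dist : ∀ c ∈ fresh, distX N c = j + 1 ∧ 1 ≤ c ∧ c ≤ N := by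
    intro c hcf
    obtain ⟨hcn, hcv⟩ := (hfresh_mem c).mp hcf
    have h1c := mem_nbrs_pos hp2 hcn
    have hcp := mem_nbrs_lt hp2 hcn
    have hcN : c ≤ N := by omega
    have hle := distX_le_parent hp2 hpb.2 hcn
    by_cases hlt : distX N c ≤ j
    · exfalso
      have hv := hCom c h1c hcN (by
        intro e he
        rcases List.mem_cons.mp he with rfl | he'
        · exact hlt
        · exact le_trans hlt (hrest_ge e he'))
      rw [hv] at hcv; cases hcv
    · exact ⟨by omega, h1c, hcN⟩
  have hnf : news.map Prod.fst = fresh := by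
    rw [hnews, List.map_map]
    show List.map id fresh = fresh
    exact List.map_id fresh
  have hEQ : (P ++ [(p, l)]) ++ (rest ++ news) = (P ++ (p, l) :: rest) ++ news := by simp
  have hfstmem : ∀ x, x ∈ ((P ++ (p, l) :: rest) ++ news).map Prod.fst ↔
      x ∈ (P ++ (p, l) :: rest).map Prod.fst ∨ x ∈ fresh := by
    intro x
    rw [List.map_append, List.mem_append, hnf]
  have hq'lvl : ∀ e ∈ rest ++ news, j ≤ distX N e.1 ∧ distX N e.1 ≤ j + 1 := by
    intro e he
    rcases List.mem_append.mp he with h | h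
    · exact ⟨hrest_ge e h, hrest_le e h⟩
    · obtain ⟨c, hcf, rfl⟩ := List.mem_map.mp h
      have hh := (hfresh_dist c hcf).1
      exact ⟨by show j ≤ distX N c; omega, by show distX N c ≤ j + 1; omega⟩
  -- field hE
  have hE' : ∀ e ∈ (P ++ [(p, l)]) ++ (rest ++ news), Entry N e := by
    intro e he
    rw [hEQ] at he
    rcases List.mem_append.mp he with hold | hnew
    · exact hE e hold
    · obtain ⟨c, hcf, rfl⟩ := List.mem_map.mp hnew
      obtain ⟨hd, h1c, hcN⟩ := hfresh_dist c hcf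
      exact entry_extend hEp (hsub hcf) (by omega) h1c hcN
  -- field hPW
  have hPW' : ((P ++ [(p, l)]) ++ (rest ++ news)).Pairwise (eLt N) := by
    have hmain : ((P ++ (p, l) :: rest) ++ news).Pairwise (eLt N) := by
      refine List.pairwise_append.mpr ⟨hPW, ?_, ?_⟩
      · have hfp : fresh.Pairwise (· < ·) := freshList_pairwise hcs (nbrs_pairwise p)
        rw [hnews]
        refine List.pairwise_map.mpr ?_
        refine List.Pairwise.imp_of_mem ?_ hfp
        intro a b ha hb hab
        right
        constructor
        · simp only
          rw [(hfresh_dist a ha).1, (hfresh_dist b hb).1]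
        · exact lex_append_singleton hab
      · intro a ha b hb
        obtain ⟨c, hcf, rfl⟩ := List.mem_map.mp hb
        have hdc := (hfresh_dist c hcf).1
        rcases List.mem_append.mp ha with haP | haq
        · refine Or.inl ?_
          show distX N a.1 < distX N c
          have := hP_le a haP
          omega
        · rcases List.mem_cons.mp haq with rfl | har
          · refine Or.inl ?_
            show distX N p < distX N c
            omega
          · by_cases hlv : distX N a.1 = j + 1
            · obtain ⟨u, huP, hunb, hupath⟩ := hPar a (by simp [har])
                ⟨(p, l), by simp, by show distX N p + 1 = distX N a.1; omega⟩
              have hEu : Entry N u := hE u (by simp [huP])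
              have hEa : Entry N a := hE a (by simp [har])
              have hlu : distX N u.1 = j := by
                have hh1 := hEu.1
                have hh2 := hEa.1
                rw [hupath] at hh2
                simp only [List.length_append, List.length_cons, List.length_nil] at hh2
                omega
              rcases hPcross u huP with h | ⟨heq, hlex⟩
              · exfalso
                have h' : distX N u.1 < distX N p := h
                omega
              · right
                constructor
                · show distX N a.1 = distX N c
                  omega
                · show List.Lex (· < ·) a.2 (l ++ [c])
                  rw [hupath]
                  have hlenu : u.2.length = l.length := by
                    have e1 := hEu.1
                    have e2 := hEp.1
                    simp only at e1 e2
                    omega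
                  exact lex_append hlenu hlex [a.1] [c]
            · have hga := hrest_ge a har
              have hla := hrest_le a har
              refine Or.inl ?_
              show distX N a.1 < distX N c
              omega
    rw [hEQ]
    exact hmain
  -- field hVis
  have hVis' : ∀ v, 1 ≤ v → v ≤ N →
      ((setAll vis fresh).getD v false = true ↔
        v ∈ ((P ++ [(p, l)]) ++ (rest ++ news)).map Prod.fst) := by
    intro v h1v hvN
    rw [hvis' v, hEQ, hfstmem v, hVis v h1v hvN]
    tauto
  -- field hClo
  have hClo' : ∀ e ∈ P ++ [(p, l)], ∀ c ∈ nbrs e.1, (setAll vis fresh).getD c false = true := by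
    intro e he c hc
    rcases List.mem_append.mp he with hPm | hpl
    · exact (hvis' c).mpr (Or.inr (hClo e hPm c hc))
    · have he2 : e = (p, l) := by simpa using hpl
      subst he2
      by_cases hv : vis.getD c false = true
      · exact (hvis' c).mpr (Or.inr hv)
      · have hvf : vis.getD c false = false := by revert hv; cases vis.getD c false <;> simp
        exact (hvis' c).mpr (Or.inl ((hfresh_mem c).mpr ⟨hc, hvf⟩))
  -- field hCom
  have hCom' : ∀ v, 1 ≤ v → v ≤ N →
      (∀ e ∈ rest ++ news, distX N v ≤ distX N e.1) →
      (setAll vis fresh).getD v false = true := by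
    intro v h1v hvN hall
    by_cases hq' : rest ++ news = []
    · have claim : ∀ d w, 1 ≤ w → w ≤ N → distX N w = d →
          (setAll vis fresh).getD w false = true := by
        intro d
        induction d using Nat.strong_induction_on with
        | _ d ih =>
          intro w h1w hwN hd
          rcases Nat.eq_or_lt_of_le hwN with rfl | hlt
          · refine (hvis' w).mpr (Or.inr (hCom w (by omega) le_rfl ?_))
            intro e he
            rw [distX_self]
            omega
          · obtain ⟨u, hwnb, hu2, huN, hdx⟩ := distX_attained h1w hlt
            have hvu := ih (distX N u) (by omega) u (by omega) huN rfl
            have humem := (hVis' u (by omega) huN).mp hvu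
            rw [hq'] at humem
            simp only [List.append_nil] at humem
            obtain ⟨eu, heu, hequ⟩ := List.mem_map.mp humem
            have := hClo' eu heu w (by rw [hequ]; exact hwnb)
            exact this
      exact claim (distX N v) v h1v hvN rfl
    · by_cases hrj : ∃ e ∈ rest, distX N e.1 = j
      · obtain ⟨e0, he0, hl0⟩ := hrj
        have hvle : distX N v ≤ j := by
          have := hall e0 (List.mem_append_left _ he0); omega
        refine (hvis' v).mpr (Or.inr (hCom v h1v hvN ?_))
        intro e he
        rcases List.mem_cons.mp he with rfl | h
        · exact hvle
        · exact le_trans hvle (hrest_ge e h)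
      · obtain ⟨e0, he0⟩ := List.exists_mem_of_ne_nil _ hq'
        have hvle : distX N v ≤ j + 1 := le_trans (hall e0 he0) (hq'lvl e0 he0).2
        by_cases hvj : distX N v ≤ j
        · refine (hvis' v).mpr (Or.inr (hCom v h1v hvN ?_))
          intro e he
          rcases List.mem_cons.mp he with rfl | h
          · exact hvj
          · exact le_trans hvj (hrest_ge e h)
        · have hvj1 : distX N v = j + 1 := by omega
          have hvltN : v < N := by
            by_contra hcon
            have hveq : v = N := by omega
            subst hveq
            rw [distX_self] at hvj1
            omega
          obtain ⟨u, hvnb, hu2, huN, hdx⟩ := distX_attained h1v hvltN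
          have hdu : distX N u = j := by omega
          have hvu : vis.getD u false = true := by
            refine hCom u (by omega) huN ?_
            intro e he
            rcases List.mem_cons.mp he with rfl | h
            · show distX N u ≤ distX N p
              omega
            · rw [hdu]; exact hrest_ge e h
          have humem := (hVis u (by omega) huN).mp hvu
          obtain ⟨eu, heu, hequ⟩ := List.mem_map.mp humem
          rcases List.mem_append.mp heu with huP | huq
          · exact (hvis' v).mpr (Or.inr (hClo eu huP v (by rw [hequ]; exact hvnb)))
          · rcases List.mem_cons.mp huq with rfl | hur
            · have hvnbp : v ∈ nbrs p := by
                have : u = p := hequ.symm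
                rwa [this] at hvnb
              by_cases hvv : vis.getD v false = true
              · exact (hvis' v).mpr (Or.inr hvv)
              · have hvf : vis.getD v false = false := by
                  revert hvv; cases vis.getD v false <;> simp
                exact (hvis' v).mpr (Or.inl ((hfresh_mem v).mpr ⟨hvnbp, hvf⟩))
            · exact absurd ⟨eu, hur, by rw [hequ]; exact hdu⟩ hrj
  -- field hND
  have hND' : (((P ++ [(p, l)]) ++ (rest ++ news)).map Prod.fst).Nodup := by
    have hmain : (((P ++ (p, l) :: rest) ++ news).map Prod.fst).Nodup := by
      rw [List.map_append, hnf]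
      refine List.nodup_append.mpr ⟨hND, ?_, ?_⟩
      · exact (freshList_pairwise hcs (nbrs_pairwise p)).imp Nat.ne_of_lt
      · intro a ha1 b hb2 heq
        subst heq
        have hva : vis.getD a false = true := by
          obtain ⟨e, he, hfe⟩ := List.mem_map.mp ha1
          have hb := entry_bounds (hE e he)
          rw [← hfe]
          exact (hVis e.1 hb.1 hb.2).mpr (by rw [hfe]; exact ha1)
        have hfa := (hfresh_mem a).mp hb2
        rw [hfa.2] at hva
        cases hva
    rw [hEQ]
    exact hmain
  -- field hG
  have hG' : ∀ e ∈ (P ++ [(p, l)]) ++ (rest ++ news), ∀ k, k ≤ d1 N →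
      e.1 = gchain N k → e.2 = gp N k := by
    intro e he k hk hek
    rw [hEQ] at he
    rcases List.mem_append.mp he with hold | hnew
    · exact hG e hold k hk hek
    · obtain ⟨c, hcf, rfl⟩ := List.mem_map.mp hnew
      simp only at hek
      have hdc := (hfresh_dist c hcf).1
      have hkj : k = j + 1 := by
        have := distX_gchain h1 hk
        rw [← hek] at this
        omega
      subst hkj
      have hjd : j + 1 ≤ d1 N := hk
      have hpg : p = gchain N j := by
        by_contra hpe
        have hgb := gchain_prop h1 j (by omega)
        have hlu : distX N (gchain N j) = j := distX_gchain h1 (by omega)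
        have hvisu : vis.getD (gchain N j) false = true := by
          refine hCom _ hgb.2.1 hgb.2.2 ?_
          intro e' he'
          rcases List.mem_cons.mp he' with rfl | h
          · show distX N (gchain N j) ≤ distX N p
            omega
          · rw [hlu]; exact hrest_ge e' h
        have humem := (hVis _ hgb.2.1 hgb.2.2).mp hvisu
        obtain ⟨eu, heu, hequ⟩ := List.mem_map.mp humem
        have heu2 : eu.2 = gp N j := hG eu heu j (by omega) hequ
        have hcnbru : c ∈ nbrs (gchain N j) := by
          have hgm := gchain_mem h1 (show j < d1 N by omega)
          rw [← hek] at hgm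
          exact hgm
        rcases List.mem_append.mp heu with huP | huq
        · have hcv := hClo eu huP c (by rw [hequ]; exact hcnbru)
          have hcf2 := (hfresh_mem c).mp hcf
          rw [hcf2.2] at hcv; cases hcv
        · rcases List.mem_cons.mp huq with rfl | hur
          · exact hpe hequ
          · have hlex : List.Lex (· < ·) l eu.2 := by
              have h := (List.pairwise_cons.mp hPWq).1 eu hur
              rcases h with h | ⟨_, hx⟩
              · exfalso
                have h' : distX N p < distX N eu.1 := h
                rw [hequ, hlu] at h'
                omega
              · exact hx
            have hcnp : gchain N (j+1) ∈ nbrs p := by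
              rw [← hek]; exact hsub hcf
            have hkm := keyMin h1 hEp rfl hjd hpe hcnp
            rw [heu2] at hlex
            exact lex_asymm hkm hlex
      have hl : l = gp N j := hG (p, l) hheadmem j (by omega) hpg
      show l ++ [c] = gp N (j + 1)
      rw [hl, gp_succ, hek]
  -- field hPar
  have hPar' : ∀ e ∈ rest ++ news,
      (∃ e' ∈ rest ++ news, distX N e'.1 + 1 = distX N e.1) →
      ∃ u ∈ P ++ [(p, l)], e.1 ∈ nbrs u.1 ∧ e.2 = u.2 ++ [e.1] := by
    intro e he hex
    obtain ⟨e', he', hle'⟩ := hex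
    have hb := hq'lvl e he
    have hb' := hq'lvl e' he'
    rcases List.mem_append.mp he with her | hen
    · obtain ⟨u, huP, hh1, hh2⟩ := hPar e (by simp [her])
        ⟨(p, l), by simp, by show distX N p + 1 = distX N e.1; omega⟩
      exact ⟨u, List.mem_append_left _ huP, hh1, hh2⟩
    · obtain ⟨c, hcf, rfl⟩ := List.mem_map.mp hen
      exact ⟨(p, l), by simp, hsub hcf, rfl⟩
  refine ⟨?_, hE', hPW', ?_, hVis', hClo', hCom', ?_, hND', hG', hPar'⟩
  · rw [length_setAll]; exact hlen
  · intro e he e' he'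
    have hb := hq'lvl e he
    have hb' := hq'lvl e' he'
    omega
  · intro e he
    rcases List.mem_append.mp he with h | h
    · exact hNo1 e h
    · have he2 : e = (p, l) := by simpa using h
      rw [he2]; exact hp

lemma getD_init {N v : Nat} :
    ((List.replicate (N + 1) false).set N true).getD v false = true ↔ v = N := by
  by_cases hv : v = N
  · subst hv
    rw [getD_set_eq (by simp)]
    simp
  · rw [getD_set_ne (fun h => hv h.symm)]
    constructor
    · intro h
      exfalso
      have hrep : (List.replicate (N+1) false).getD v false = false := by
        rw [List.getD_eq_getElem?_getD, List.getElem?_replicate]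
        split_ifs <;> rfl
      rw [hrep] at h; cases h
    · intro h; exact absurd h hv

lemma init_inv {N : Nat} (h1 : 1 ≤ N) :
    BfsInv N [] [(N, [N])] ((List.replicate (N + 1) false).set N true) := by
  have hEN : Entry N (N, [N]) := by
    refine ⟨by simp [distX_self], rfl, rfl, ?_, ?_⟩
    · intro i hi; simp at hi
    · intro i hi
      simp only [List.length_cons, List.length_nil] at hi
      have hi0 : i = 0 := by omega
      subst hi0
      exact ⟨h1, le_rfl, by simp [distX_self]⟩
  refine ⟨?_, ?_, ?_, ?_, ?_, ?_, ?_, ?_, ?_, ?_, ?_⟩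
  · simp
  · intro e he
    simp only [List.nil_append, List.mem_singleton] at he
    rw [he]; exact hEN
  · simp
  · intro e he e' he'
    simp only [List.mem_singleton] at he he'
    rw [he, he']; omega
  · intro v h1v hvN
    rw [getD_init]
    simp
  · intro e he; cases he
  · intro v h1v hvN hall
    have h := hall (N, [N]) (by simp)
    rw [distX_self] at h
    have hv0 : distX N v = 0 := by omega
    rw [getD_init]
    exact (distX_eq_zero_iff h1v hvN).mp hv0
  · intro e he; cases he
  · simp
  · intro e he k hk hek
    simp only [List.nil_append, List.mem_singleton] at he
    subst he
    simp only at hek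
    have hk0 : k = 0 := by
      rcases Nat.eq_zero_or_pos k with h | h
      · exact h
      · exfalso
        have hh := (gchain_prop h1 k hk).1
        rw [← hek] at hh
        omega
    subst hk0
    show [N] = gp N 0
    rw [gp_zero]
  · intro e he hx
    obtain ⟨e', he', hcon⟩ := hx
    simp only [List.mem_singleton] at he he'
    rw [he, he'] at hcon
    simp only [distX_self] at hcon
    cases hcon

lemma loop_correct {N : Nat} (h1 : 1 ≤ N) :
    ∀ (K : Nat) (P q : List (Nat × List Nat)) (vis : List Bool),
      BfsInv N P q vis → 1 ∉ P.map Prod.fst → N + 1 ≤ K + P.length →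
      bfsLoop K vis q = gp N (d1 N) := by
  intro K
  induction K with
  | zero =>
    intro P q vis hI h1P hK
    exfalso
    have hnd : (P.map Prod.fst).Nodup := by
      have h := hI.hND
      rw [List.map_append] at h
      exact h.of_append_left
    have hsubP : P.map Prod.fst ⊆ List.range' 1 N := by
      intro x hx
      obtain ⟨e, he, rfl⟩ := List.mem_map.mp hx
      have hb := entry_bounds (hI.hE e (List.mem_append_left _ he))
      rw [List.mem_range'_1]
      omega
    have hlenle := (List.subperm_of_subset hnd hsubP).length_le
    rw [List.length_map, List.length_range'] at hlenle
    omega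
  | succ K ih =>
    intro P q vis hI h1P hK
    match q with
    | [] =>
      exfalso
      have hv1 : vis.getD 1 false = true := hI.hCom 1 le_rfl h1 (by intro e he; cases he)
      have h := (hI.hVis 1 le_rfl h1).mp hv1
      simp only [List.append_nil] at h
      exact h1P h
    | (pp, l) :: rest =>
      by_cases hp : pp = 1
      · subst hp
        have hres : bfsLoop (K+1) vis ((1, l) :: rest) = l := by
          rw [body_eq]; simp
        rw [hres]
        exact hI.hG (1, l) (by simp) (d1 N) le_rfl (gchain_last h1).symm
      · rw [body_eq, if_neg hp]
        refine ih (P ++ [(pp, l)]) _ _ (step_inv h1 hI hp) ?_ ?_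
        · intro hmem
          rw [List.map_append] at hmem
          rcases List.mem_append.mp hmem with h | h
          · exact h1P h
          · simp at h
            exact hp h.symm
        · rw [List.length_append]
          simp only [List.length_cons, List.length_nil]
          omega

lemma bfs_eq_gp {N : Nat} (h1 : 1 ≤ N) :
    bfsLoop (N + 1) ((List.replicate (N + 1) false).set N true) [(N, [N])] = gp N (d1 N) :=
  loop_correct h1 (N + 1) [] [(N, [N])] _ (init_inv h1) (by simp) (by simp)

-- ---- B side ----
lemma dpStep_getD_self {dp : List Nat} {i : Nat} (hlen : i < dp.length) (h2 : 2 ≤ i)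
    (hv1 : dp.getD (i - 1) 0 = d1 (i - 1)) (hv2 : dp.getD (i / 2) 0 = d1 (i / 2))
    (hv3 : dp.getD (i / 3) 0 = d1 (i / 3)) :
    (dpStep dp i).getD i 0 = d1 i := by
  simp only [dpStep]
  rw [getD_set_eq hlen]
  rw [hv1, hv2, hv3]
  conv_rhs => rw [d1]
  simp only [show ¬ i ≤ 1 by omega, dite_false]
  split_ifs <;> omega

lemma dpStep_getD_ne {dp : List Nat} {i k : Nat} (h : i ≠ k) :
    (dpStep dp i).getD k 0 = dp.getD k 0 := by
  simp only [dpStep]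
  exact getD_set_ne h _

lemma dpTable {n : Nat} (_h1 : 1 ≤ n) : ∀ m, m + 1 ≤ n →
    ((List.range' 2 m).foldl dpStep (List.replicate (n + 1) 0)).length = n + 1 ∧
    (∀ i, i ≤ m + 1 →
      ((List.range' 2 m).foldl dpStep (List.replicate (n + 1) 0)).getD i 0 = d1 i) := by
  intro m
  induction m with
  | zero =>
    intro _
    refine ⟨by simp, ?_⟩
    intro i hi
    interval_cases i
    · show (List.replicate (n + 1) (0:Nat)).getD 0 0 = d1 0
      rw [getD_replicate0, d1_zero]
    · show (List.replicate (n + 1) (0:Nat)).getD 1 0 = d1 1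
      rw [getD_replicate0, d1_one]
  | succ m ih =>
    intro hm
    obtain ⟨hlen, hval⟩ := ih (by omega)
    have hrng : List.range' 2 (m + 1) = List.range' 2 m ++ [2 + m] := by
      rw [List.range'_concat]
      norm_num
    rw [hrng, List.foldl_append]
    set T := (List.range' 2 m).foldl dpStep (List.replicate (n + 1) 0) with hT
    have hsetlen : (List.foldl dpStep T [2 + m]).length = n + 1 := by
      show (dpStep T (2 + m)).length = n + 1
      simp only [dpStep]
      rw [List.length_set, hlen]
    refine ⟨hsetlen, ?_⟩
    intro i hi
    have hidx : 2 + m < T.length := by omega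
    have hv1 : T.getD ((2+m) - 1) 0 = d1 ((2+m) - 1) := hval _ (by omega)
    have hv2 : T.getD ((2+m) / 2) 0 = d1 ((2+m) / 2) := hval _ (by omega)
    have hv3 : T.getD ((2+m) / 3) 0 = d1 ((2+m) / 3) := hval _ (by omega)
    by_cases hieq : i = 2 + m
    · subst hieq
      show (dpStep T (2 + m)).getD (2 + m) 0 = d1 (2 + m)
      exact dpStep_getD_self hidx (by omega) hv1 hv2 hv3
    · show (dpStep T (2 + m)).getD i 0 = d1 i
      rw [dpStep_getD_ne (fun hh => hieq hh.symm)]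
      exact hval i (by omega)

lemma rebuild_eq {n : Nat} {T : List Nat} (hT : ∀ i, i ≤ n → T.getD i 0 = d1 i) :
    ∀ (fuel cur : Nat), 1 ≤ cur → cur ≤ n → cur ≤ fuel →
      rebuild fuel T cur = (List.range (d1 cur)).map (fun k => gchain cur (k + 1)) := by
  intro fuel
  induction fuel with
  | zero => intro cur hc1 _ hf; omega
  | succ fuel ih =>
    intro cur hc1 hn hf
    by_cases hcur : cur = 1
    · subst hcur
      rw [rebuild]
      simp [d1_one]
    · have h2 : 2 ≤ cur := by omega
      have hd1c : 1 ≤ d1 cur := d1_pos h2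
      obtain ⟨hmem, hdp⟩ := pick_spec h2
      have hnxt :
          (if cur % 3 = 0 ∧ T.getD (cur / 3) 0 = T.getD cur 0 - 1 then cur / 3
           else if cur % 2 = 0 ∧ T.getD (cur / 2) 0 = T.getD cur 0 - 1 then cur / 2
           else cur - 1) = pick cur := by
        rw [hT cur hn, hT (cur / 3) (by omega), hT (cur / 2) (by omega)]
        unfold pick
        split_ifs <;> omega
      rw [rebuild]
      simp only [hcur, if_false]
      rw [hnxt]
      have hpl := pick_lt h2
      have hpp := pick_pos h2
      rw [ih (pick cur) hpp (by omega) (by omega)]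
      have hrange : d1 cur = d1 (pick cur) + 1 := by omega
      rw [hrange, List.range_succ_eq_map, List.map_cons, List.map_map]
      congr 1
      apply List.map_congr_left
      intro k _
      show gchain (pick cur) (k + 1) = gchain cur (k + 1 + 1)
      rw [gchain_shift cur (k + 1)]

lemma alt_eq_gp {n : Nat} (h1 : 1 ≤ n) :
    (n :: rebuild n ((List.range' 2 (n - 1)).foldl dpStep (List.replicate (n + 1) 0)) n) =
      gp n (d1 n) := by
  obtain ⟨hlen, hval⟩ := dpTable h1 (n - 1) (by omega)
  have hT : ∀ i, i ≤ n → ((List.range' 2 (n - 1)).foldl dpStep (List.replicate (n + 1) 0)).getD i 0 = d1 i := by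
    intro i hi; exact hval i (by omega)
  rw [rebuild_eq hT n n h1 le_rfl le_rfl]
  unfold gp
  rw [List.range_succ_eq_map, List.map_cons, List.map_map]
  rfl

-- ===== VERDICT (by name: the statement is the Claim_ definition above) =====
theorem bfs_spec : Claim_equal_bfs := by
  intro x _ hpre
  have hx : ¬ x < 1 := by unfold Pre_bfs at hpre; omega
  have h1 : 1 ≤ x.toNat := by omega
  have hA : bfs x = (gp x.toNat (d1 x.toNat)).map (fun v => (v : Int)) := by
    unfold bfs
    rw [if_neg hx]
    show (bfsLoop (x.toNat + 1) ((List.replicate (x.toNat + 1) false).set x.toNat true)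
        [(x.toNat, [x.toNat])]).map (fun v => (v : Int)) = _
    rw [bfs_eq_gp h1]
  have hB : bfs_alt x = (gp x.toNat (d1 x.toNat)).map (fun v => (v : Int)) := by
    unfold bfs_alt
    rw [if_neg hx]
    show ((x.toNat :: rebuild x.toNat ((List.range' 2 (x.toNat - 1)).foldl dpStep
        (List.replicate (x.toNat + 1) 0)) x.toNat).map (fun v => (v : Int))) = _
    rw [alt_eq_gp h1]
  show bfs x = bfs_alt x
  rw [hA, hB]
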